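-- pv_equiv track=rewrite | github.com/bongho/codewar | dubstep.py | song_decoder
-- ===== SOURCE A (Python) =====
-- def song_decoder(song):
--     parts = song.split("WUB")
--     outcome = ''
--     for i in range(0,len(parts)):
--         if(parts[i] != ''):
--             outcome += ' ' + parts[i]
--     outcome = outcome.strip()
--     return outcome
-- ===== SOURCE B (Python) =====
-- def song_decoder(song):
--     # single left-to-right scan: consume "WUB" markers, collect the words in between
--     words = []
--     cur = []
--     i = 0
--     n = len(song)
--     while i < n:
--         if song.startswith("WUB", i):
--             if cur:
--                 words.append(''.join(cur))
--                 cur = []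
--             i += 3
--         else:
--             cur.append(song[i])
--             i += 1
--     if cur:
--         words.append(''.join(cur))
--     return ' '.join(words).strip()
-- ===== Notes on version B (the rewrite author's own statement) =====
-- stated objective: alternative
-- what changed: B replaces split-on-the-marker + index loop over the parts + repeated string concatenation + final strip with a single left-to-right character scan that consumes marker occurrences, collects the words in between, and joins them once at the end.
import Mathlib
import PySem

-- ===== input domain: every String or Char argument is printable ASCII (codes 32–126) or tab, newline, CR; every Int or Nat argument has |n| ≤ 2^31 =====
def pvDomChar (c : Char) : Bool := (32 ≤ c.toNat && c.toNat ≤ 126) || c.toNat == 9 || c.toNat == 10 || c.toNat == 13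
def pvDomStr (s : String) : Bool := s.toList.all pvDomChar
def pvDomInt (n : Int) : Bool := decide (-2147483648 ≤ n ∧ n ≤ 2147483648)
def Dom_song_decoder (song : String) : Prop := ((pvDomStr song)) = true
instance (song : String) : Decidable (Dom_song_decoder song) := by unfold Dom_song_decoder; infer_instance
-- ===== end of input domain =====

-- B replaces split("WUB") + index loop + string += with one left-to-right scan collecting words; return value only.

-- ===== PORT A =====
def song_decoder (song : String) : String :=
  let parts : List (List Char) := PySem.Chars.splitOn song.toList "WUB".toList
  let outcome : List Char :=
    (PySem.List.pyRange 0 (PySem.List.len parts)).foldl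
      (fun outcome i =>
        if PySem.List.pyGetD parts i [] ≠ [] then
          outcome ++ (' ' :: PySem.List.pyGetD parts i [])
        else outcome) []
  String.ofList (PySem.Chars.strip outcome)

-- ===== PORT B =====
-- the scan: consume a "WUB" marker (flushing the current word) or accumulate one character
def pvScan : List Char → List Char → List (List Char)
  | [], cur => if cur = [] then [] else [cur.reverse]
  | c :: rest, cur =>
    if ("WUB".toList).isPrefixOf (c :: rest) then
      if cur = [] then pvScan (rest.drop 2) []
      else cur.reverse :: pvScan (rest.drop 2) []
    else pvScan rest (c :: cur)
  termination_by l _ => l.length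
  decreasing_by all_goals (simp only [List.length_drop, List.length_cons]; omega)

def song_decoder_alt (song : String) : String :=
  let words := pvScan song.toList []
  String.ofList (PySem.Chars.strip (PySem.Chars.join [' '] words))

-- ===== PRECONDITION & SPEC =====
def Spec_song_decoder (song : String) (out : String) : Prop := out = song_decoder_alt song
instance (song : String) (out : String) : Decidable (Spec_song_decoder song out) := by unfold Spec_song_decoder; infer_instance

-- ===== CLAIM (what is proved, stated in full; the proofs are below) =====
def Claim_equal_song_decoder : Prop := ∀ (song : String), Dom_song_decoder song → Spec_song_decoder song (song_decoder song)

-- ===== LEMMAS AND PROOFS =====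

theorem pvScan_cons_pos (c : Char) (rest cur : List Char)
    (hp : ("WUB".toList).isPrefixOf (c :: rest) = true) :
    pvScan (c :: rest) cur
      = if cur = [] then pvScan (rest.drop 2) [] else cur.reverse :: pvScan (rest.drop 2) [] := by
  rw [pvScan, if_pos hp]

theorem pvScan_cons_neg (c : Char) (rest cur : List Char)
    (hp : ¬ ("WUB".toList).isPrefixOf (c :: rest) = true) :
    pvScan (c :: rest) cur = pvScan rest (c :: cur) := by
  rw [pvScan, if_neg hp]

-- the scan computes exactly the non-empty fragments of splitOn "WUB"
theorem pvScan_eq_filter_go : ∀ (fuel : Nat) (l cur : List Char) (acc : List (List Char)),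
    l.length < fuel →
    (PySem.Chars.splitOn.go "WUB".toList fuel l cur acc).filter (fun p => decide (p ≠ []))
      = acc.reverse.filter (fun p => decide (p ≠ [])) ++ pvScan l cur := by
  intro fuel
  induction fuel with
  | zero => intro l cur acc h; omega
  | succ fuel ih =>
    intro l cur acc h
    cases l with
    | nil =>
      rw [PySem.Chars.splitOn.go.eq_def]
      by_cases hc : cur = [] <;> simp [pvScan, hc, List.filter_append]
    | cons c rest =>
      rw [PySem.Chars.splitOn.go.eq_def]
      simp only []
      by_cases hp : ("WUB".toList).isPrefixOf (c :: rest) = true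
      · rw [if_pos hp, ih _ _ _ (by simp at h ⊢; omega), pvScan_cons_pos c rest cur hp]
        by_cases hc : cur = [] <;> simp [hc, List.filter_append]
      · rw [if_neg hp, ih rest (c :: cur) acc (by simp at h ⊢; omega),
            pvScan_cons_neg c rest cur hp]

theorem pvScan_eq_filter_splitOn (s : List Char) :
    (PySem.Chars.splitOn s "WUB".toList).filter (fun p => decide (p ≠ [])) = pvScan s [] := by
  have h := pvScan_eq_filter_go (s.length + 1) s [] [] (by omega)
  simpa [PySem.Chars.splitOn] using h

theorem foldl_if_prepend (l : List (List Char)) (acc : List Char) :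
    l.foldl (fun out p => if p ≠ [] then out ++ (' ' :: p) else out) acc
      = acc ++ (l.filter (fun p => decide (p ≠ []))).flatMap (fun p => ' ' :: p) := by
  induction l generalizing acc with
  | nil => simp
  | cons w rest ih =>
    simp only [List.foldl_cons]
    rw [ih]
    by_cases hw : w = [] <;> simp [hw]

theorem intercalate_space (w : List Char) (rest : List (List Char)) :
    List.intercalate [' '] (w :: rest) = w ++ rest.flatMap (fun p => ' ' :: p) := by
  induction rest generalizing w with
  | nil => simp [List.intercalate]
  | cons r rs ih =>
    have : List.intercalate [' '] (w :: r :: rs) = w ++ [' '] ++ List.intercalate [' '] (r :: rs) := by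
      simp [List.intercalate, List.intersperse]
    simp [this, ih r, List.flatMap_cons]

theorem strip_cons_space (xs : List Char) :
    PySem.Chars.strip (' ' :: xs) = PySem.Chars.strip xs := by
  simp [PySem.Chars.strip, PySem.Chars.lstrip, List.dropWhile, PySem.Chars.isspace]

theorem strip_flatMap_eq_strip_join (ws : List (List Char)) :
    PySem.Chars.strip (ws.flatMap (fun p => ' ' :: p))
      = PySem.Chars.strip (PySem.Chars.join [' '] ws) := by
  cases ws with
  | nil => simp [PySem.Chars.join, List.intercalate]
  | cons w rest =>
    have h1 : (w :: rest).flatMap (fun p => ' ' :: p) = ' ' :: (w ++ rest.flatMap (fun p => ' ' :: p)) := by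
      simp [List.flatMap_cons]
    rw [h1, strip_cons_space, PySem.Chars.join, intercalate_space]

-- ===== VERDICT (by name: the statement is the Claim_ definition above) =====
theorem song_decoder_spec : Claim_equal_song_decoder := by
  intro song _
  show song_decoder song = song_decoder_alt song
  show String.ofList (PySem.Chars.strip
      ((PySem.List.pyRange 0 (PySem.List.len (PySem.Chars.splitOn song.toList "WUB".toList))).foldl
        (fun outcome i =>
          if PySem.List.pyGetD (PySem.Chars.splitOn song.toList "WUB".toList) i [] ≠ [] then
            outcome ++ (' ' :: PySem.List.pyGetD (PySem.Chars.splitOn song.toList "WUB".toList) i [])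
          else outcome) []))
    = String.ofList (PySem.Chars.strip (PySem.Chars.join [' '] (pvScan song.toList [])))
  rw [PySem.List.foldl_pyRange_pyGetD (PySem.Chars.splitOn song.toList "WUB".toList) ([] : List Char)
        (fun out p => if p ≠ [] then out ++ (' ' :: p) else out) [] le_rfl]
  simp only [Int.toNat_zero, List.drop_zero]
  rw [foldl_if_prepend, List.nil_append, ← pvScan_eq_filter_splitOn,
    strip_flatMap_eq_strip_join]
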